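-- pv_equiv track=rewrite | github.com/shreyas7124/mcp-excel | mcp_excel2.py | _find_top_level_json_blocks
-- ===== SOURCE A (Python) =====
-- from typing import Dict, Any, List, Optional, Tuple
--
-- def _find_top_level_json_blocks(s: str) -> List[Tuple[int, int]]:
--     """
--     Find indices (start, end) of top-level {...} or [...] JSON blocks using a stack
--     so nested braces are handled correctly. Returns list of (start, end) slices.
--     """
--     starts = []
--     blocks = []
--     stack = []
--     for i, ch in enumerate(s):
--         if ch == '{' or ch == '[':
--             stack.append((ch, i))
--         elif ch == '}' or ch == ']':
--             if not stack:
--                 continue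
--             opening, start_idx = stack.pop()
--             # check matching pair type (simple)
--             if (opening == '{' and ch == '}') or (opening == '[' and ch == ']'):
--                 if not stack:
--                     # top-level block closed
--                     blocks.append((start_idx, i + 1))
--     return blocks
-- ===== SOURCE B (Python) =====
-- from typing import List, Tuple
--
-- def _find_top_level_json_blocks(s: str) -> List[Tuple[int, int]]:
--     """Depth counter instead of a stack: only the outermost opener can ever
--     record a block, so remember just its char and index."""
--     blocks = []
--     depth = 0
--     open_ch = ' '
--     start = 0
--     for i, ch in enumerate(s):
--         if ch == '{' or ch == '[':
--             if depth == 0: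
--                 open_ch, start = ch, i
--             depth += 1
--         elif ch == '}' or ch == ']':
--             if depth == 0:
--                 continue
--             if depth == 1 and ((open_ch == '{' and ch == '}') or (open_ch == '[' and ch == ']')):
--                 blocks.append((start, i + 1))
--             depth -= 1
--     return blocks
-- ===== Notes on version B (the rewrite author's own statement) =====
-- stated objective: simpler
-- what changed: Replaces the stack of (char,index) pairs with an integer depth counter plus two scalars remembering the outermost opener's char and index; only the outermost opener can ever record a block, so the stack is unnecessary.
import Mathlib
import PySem

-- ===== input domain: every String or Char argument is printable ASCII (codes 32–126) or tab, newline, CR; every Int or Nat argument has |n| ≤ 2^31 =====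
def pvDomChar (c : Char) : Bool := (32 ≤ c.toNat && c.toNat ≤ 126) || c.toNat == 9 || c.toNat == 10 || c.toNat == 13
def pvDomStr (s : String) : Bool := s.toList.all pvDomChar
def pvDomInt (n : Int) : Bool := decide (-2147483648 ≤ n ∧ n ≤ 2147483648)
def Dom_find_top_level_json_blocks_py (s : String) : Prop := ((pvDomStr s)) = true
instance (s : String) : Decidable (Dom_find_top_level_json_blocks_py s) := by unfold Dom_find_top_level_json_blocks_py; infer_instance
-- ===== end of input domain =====

-- B: depth counter + two scalars for the outermost opener instead of a stack of pairs (simpler; return value equivalent).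


-- ===== PORT A =====
-- pop-and-maybe-record step of A's closer branch (the body of the elif, step for step)
def find_top_level_json_blocks_py.aClose : Char → Int → List (Char × Int) → List (Int × Int) →
    List (Char × Int) × List (Int × Int)
  | _, _, [], blocks => ([], blocks)  -- 'if not stack: continue'
  | ch, i, (opening, start_idx) :: tl, blocks =>
    if (opening = '{' ∧ ch = '}') ∨ (opening = '[' ∧ ch = ']') then
      if tl = [] then (tl, blocks ++ [(start_idx, i + 1)])
      else (tl, blocks)
    else (tl, blocks)

def find_top_level_json_blocks_py.aLoop : List (Int × Char) → List (Char × Int) → List (Int × Int) → List (Int × Int)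
  | [], _, blocks => blocks
  | (i, ch) :: rest, stack, blocks =>
    if ch = '{' ∨ ch = '[' then
      find_top_level_json_blocks_py.aLoop rest ((ch, i) :: stack) blocks
    else if ch = '}' ∨ ch = ']' then
      let r := find_top_level_json_blocks_py.aClose ch i stack blocks
      find_top_level_json_blocks_py.aLoop rest r.1 r.2
    else find_top_level_json_blocks_py.aLoop rest stack blocks

def find_top_level_json_blocks_py (s : String) : List (Int × Int) :=
  find_top_level_json_blocks_py.aLoop (PySem.List.enumerate s.toList) [] []

-- ===== PORT B =====
def find_top_level_json_blocks_py_alt.bLoop : List (Int × Char) → Int → Char → Int → List (Int × Int) → List (Int × Int)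
  | [], _, _, _, blocks => blocks
  | (i, ch) :: rest, depth, open_ch, start, blocks =>
    if ch = '{' ∨ ch = '[' then
      if depth = 0 then find_top_level_json_blocks_py_alt.bLoop rest (depth + 1) ch i blocks
      else find_top_level_json_blocks_py_alt.bLoop rest (depth + 1) open_ch start blocks
    else if ch = '}' ∨ ch = ']' then
      if depth = 0 then find_top_level_json_blocks_py_alt.bLoop rest depth open_ch start blocks
      else
        find_top_level_json_blocks_py_alt.bLoop rest (depth - 1) open_ch start
          (if depth = 1 ∧ ((open_ch = '{' ∧ ch = '}') ∨ (open_ch = '[' ∧ ch = ']')) then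
            blocks ++ [(start, i + 1)] else blocks)
    else find_top_level_json_blocks_py_alt.bLoop rest depth open_ch start blocks

def find_top_level_json_blocks_py_alt (s : String) : List (Int × Int) :=
  find_top_level_json_blocks_py_alt.bLoop (PySem.List.enumerate s.toList) 0 ' ' 0 []

-- ===== PRECONDITION & SPEC =====
def Spec_find_top_level_json_blocks_py (s : String) (out : List (Int × Int)) : Prop := out = find_top_level_json_blocks_py_alt s
instance (s : String) (out : List (Int × Int)) : Decidable (Spec_find_top_level_json_blocks_py s out) := by unfold Spec_find_top_level_json_blocks_py; infer_instance

-- ===== CLAIM (what is proved, stated in full; the proofs are below) =====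
def Claim_equal_find_top_level_json_blocks_py : Prop := ∀ (s : String), Dom_find_top_level_json_blocks_py s → Spec_find_top_level_json_blocks_py s (find_top_level_json_blocks_py s)

-- ===== LEMMAS AND PROOFS =====
lemma getLast?_cons_ne {α : Type} (x : α) (tl : List α) (h : tl ≠ []) :
    (x :: tl).getLast? = tl.getLast? := by
  cases htl : tl.getLast? with
  | none => exact absurd (List.getLast?_eq_none_iff.mp htl) h
  | some y => rw [List.getLast?_cons, htl]; rfl

lemma aLoop_eq_bLoop : ∀ (l : List (Int × Char)) (stack : List (Char × Int))
    (blocks : List (Int × Int)) (c : Char) (v : Int),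
    (stack = [] ∨ stack.getLast? = some (c, v)) →
    find_top_level_json_blocks_py.aLoop l stack blocks
      = find_top_level_json_blocks_py_alt.bLoop l (stack.length : Int) c v blocks := by
  intro l
  induction l with
  | nil => intro stack blocks c v _; rfl
  | cons p rest ih =>
    obtain ⟨i, ch⟩ := p
    intro stack blocks c v hinv
    simp only [find_top_level_json_blocks_py.aLoop, find_top_level_json_blocks_py_alt.bLoop]
    by_cases hop : ch = '{' ∨ ch = '['
    · rw [if_pos hop, if_pos hop]
      rcases hinv with h0 | hlast
      · subst h0
        rw [if_pos (by norm_num : ((([] : List (Char × Int)).length : Int)) = 0)]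
        have := ih [(ch, i)] blocks ch i (Or.inr rfl)
        simpa using this
      · have hne : stack ≠ [] := by
          intro h; subst h; simp at hlast
        have hlen : ((stack.length : Int)) ≠ 0 := by
          simp [List.length_eq_zero_iff, hne]
        rw [if_neg hlen]
        have hlast' : ((ch, i) :: stack).getLast? = some (c, v) := by
          rw [getLast?_cons_ne _ _ hne]; exact hlast
        have hrec := ih ((ch, i) :: stack) blocks c v (Or.inr hlast')
        have hc : ((((ch, i) :: stack).length : Nat) : Int) = (stack.length : Int) + 1 := by
          simp only [List.length_cons]; push_cast; ring
        rw [hc] at hrec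
        exact hrec
    · rw [if_neg hop, if_neg hop]
      by_cases hcl : ch = '}' ∨ ch = ']'
      · rw [if_pos hcl, if_pos hcl]
        rcases stack with _ | ⟨⟨opening, start_idx⟩, tl⟩
        · rw [if_pos (by norm_num : ((([] : List (Char × Int)).length : Int)) = 0)]
          simp only [find_top_level_json_blocks_py.aClose]
          exact ih [] blocks c v (Or.inl rfl)
        · have hlen0 : ¬ ((((opening, start_idx) :: tl).length : Int) = 0) := by
            simp only [List.length_cons]; push_cast; omega
          rw [if_neg hlen0]
          simp only [find_top_level_json_blocks_py.aClose]
          rcases hinv with h0 | hlast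
          · exact absurd h0 (by simp)
          by_cases htl : tl = []
          · subst htl
            have hov : opening = c ∧ start_idx = v := by
              simp at hlast; exact ⟨hlast.1, hlast.2⟩
            obtain ⟨rfl, rfl⟩ := hov
            by_cases hm : (opening = '{' ∧ ch = '}') ∨ (opening = '[' ∧ ch = ']')
            · rw [if_pos hm, if_pos rfl]
              simp only
              rw [ih [] (blocks ++ [(start_idx, i + 1)]) opening start_idx (Or.inl rfl)]
              norm_num [hm]
            · rw [if_neg hm]
              simp only
              rw [ih [] blocks opening start_idx (Or.inl rfl)]
              norm_num [hm]
          · have hlast' : tl.getLast? = some (c, v) := by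
              rwa [getLast?_cons_ne _ _ htl] at hlast
            have htlpos : 0 < tl.length := List.length_pos_of_ne_nil htl
            have hcond : ¬ (((((opening, start_idx) :: tl).length : Int)) = 1 ∧
                ((c = '{' ∧ ch = '}') ∨ (c = '[' ∧ ch = ']'))) := by
              intro hcon
              have := hcon.1
              simp only [List.length_cons] at this
              push_cast at this
              omega
            rw [if_neg hcond]
            have hrec := ih tl blocks c v (Or.inr hlast')
            have hsub : ((((opening, start_idx) :: tl).length : Int)) - 1 = (tl.length : Int) := by
              simp only [List.length_cons]; push_cast; ring
            rw [hsub]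
            by_cases hm : (opening = '{' ∧ ch = '}') ∨ (opening = '[' ∧ ch = ']')
            · rw [if_pos hm, if_neg htl]
              exact hrec
            · rw [if_neg hm]
              exact hrec
      · rw [if_neg hcl, if_neg hcl]
        exact ih stack blocks c v hinv

-- ===== VERDICT (by name: the statement is the Claim_ definition above) =====
theorem find_top_level_json_blocks_py_spec : Claim_equal_find_top_level_json_blocks_py := by
  intro s _
  unfold Spec_find_top_level_json_blocks_py find_top_level_json_blocks_py find_top_level_json_blocks_py_alt
  exact aLoop_eq_bLoop _ [] [] ' ' 0 (Or.inl rfl)
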